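-- pv_equiv track=rewrite | github.com/bic-potato/codeforces_learning | Python/Queue at the School.py | reconstructure
-- ===== SOURCE A (Python) =====
-- def reconstructure (num1,num2,list2):
--     list1=list()
--     for i in list2:
--         a=int(i)
--         a+=num1
--         if (a>num2):
--             a=num2
--         while a in list1:
--             a-=1
--         else:
--             list1.append(a)
--     return list1
-- ===== SOURCE B (Python) =====
-- def reconstructure(num1, num2, list2):
--     # next-free-slot pointers with path compression: nxt[v] = a candidate slot
--     # strictly below v that leads (via chasing) to the largest free slot <= v
--     nxt = {}
--     out = []
--     for x in list2:
--         a = int(x) + num1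
--         if a > num2:
--             a = num2
--         path = []
--         while a in nxt:
--             path.append(a)
--             a = nxt[a]
--         out.append(a)
--         nxt[a] = a - 1
--         for p in path:
--             nxt[p] = a - 1
--     return out
-- ===== Notes on version B (the rewrite author's own statement) =====
-- stated objective: faster
-- what changed: Replaced the per-element linear decrement through the output list (membership-scan per step) with a next-free-slot pointer dict with path compression, so each query jumps straight past occupied runs.
import Mathlib
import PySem

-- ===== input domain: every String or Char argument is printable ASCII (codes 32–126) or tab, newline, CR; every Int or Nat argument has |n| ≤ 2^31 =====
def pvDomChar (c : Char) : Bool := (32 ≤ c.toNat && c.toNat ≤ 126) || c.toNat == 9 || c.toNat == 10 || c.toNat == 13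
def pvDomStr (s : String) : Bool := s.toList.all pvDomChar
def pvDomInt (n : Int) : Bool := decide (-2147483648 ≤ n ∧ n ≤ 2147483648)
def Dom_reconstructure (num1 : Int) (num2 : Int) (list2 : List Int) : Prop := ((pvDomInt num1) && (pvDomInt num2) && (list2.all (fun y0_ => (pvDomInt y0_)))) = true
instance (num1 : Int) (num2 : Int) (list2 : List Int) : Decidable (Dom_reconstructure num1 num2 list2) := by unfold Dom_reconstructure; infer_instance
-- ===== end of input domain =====

-- B replaces A's per-element linear decrement through the output list with a
-- next-free-slot pointer dict with path compression (objective: faster).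


-- ===== PORT A =====
-- termination measure for A's 'while a in list1: a -= 1' loop
theorem pyDecr_measure {l : List Int} {b a : Int} (hb : b < a) (ha : a ∈ l) :
    (l.filter (fun x => decide (x ≤ b))).length < (l.filter (fun x => decide (x ≤ a))).length := by
  have hsub : l.filter (fun x => decide (x ≤ b)) =
      (l.filter (fun x => decide (x ≤ a))).filter (fun x => decide (x ≤ b)) := by
    rw [List.filter_filter]
    apply List.filter_congr
    intro x _
    by_cases h : x ≤ b
    · have ha' : x ≤ a := by omega
      simp [h, ha']
    · simp [h]
  rw [hsub]
  apply List.length_filter_lt_length_iff_exists.mpr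
  refine ⟨a, List.mem_filter.mpr ⟨ha, by simp⟩, by simp; omega⟩

-- A's inner loop: while a in list1: a -= 1
def pyDecr (l : List Int) (a : Int) : Int :=
  if h : a ∈ l then pyDecr l (a - 1) else a
termination_by (l.filter (fun x => decide (x ≤ a))).length
decreasing_by exact pyDecr_measure (by omega) h

def reconstructure (num1 : Int) (num2 : Int) (list2 : List Int) : List Int :=
  list2.foldl (fun list1 i =>
    let a := i + num1
    let a := if a > num2 then num2 else a
    list1 ++ [pyDecr list1 a]) []

-- ===== PORT B =====
-- B's inner while loop: chase nxt pointers, recording the path; the fuel only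
-- makes the recursion structurally total (the proofs show d.size + 1 is enough).
def findPath (fuel : Nat) (d : PySem.Dict Int Int) (a : Int) : List Int × Int :=
  match fuel with
  | 0 => ([], a)
  | n + 1 =>
    match d.get? a with
    | none => ([], a)
    | some v =>
      let r := findPath n d v
      (a :: r.1, r.2)

def reconstructure_alt (num1 : Int) (num2 : Int) (list2 : List Int) : List Int :=
  (list2.foldl (fun (st : PySem.Dict Int Int × List Int) x =>
    let a := x + num1
    let a := if a > num2 then num2 else a
    let pr := findPath (st.1.size + 1) st.1 a
    let b := pr.2
    let d := st.1.insert b (b - 1)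
    let d := pr.1.foldl (fun d p => d.insert p (b - 1)) d
    (d, st.2 ++ [b])) (PySem.Dict.empty, [])).2

-- ===== PRECONDITION & SPEC =====
def Spec_reconstructure (num1 : Int) (num2 : Int) (list2 : List Int) (out : List Int) : Prop := out = reconstructure_alt num1 num2 list2
instance (num1 : Int) (num2 : Int) (list2 : List Int) (out : List Int) : Decidable (Spec_reconstructure num1 num2 list2 out) := by unfold Spec_reconstructure; infer_instance

-- ===== CLAIM (what is proved, stated in full; the proofs are below) =====
def Claim_equal_reconstructure : Prop := ∀ (num1 : Int) (num2 : Int) (list2 : List Int), Dom_reconstructure num1 num2 list2 → Spec_reconstructure num1 num2 list2 (reconstructure num1 num2 list2)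

-- ===== LEMMAS AND PROOFS =====

theorem pyDecr_le (l : List Int) (a : Int) : pyDecr l a ≤ a := by
  fun_induction pyDecr l a with
  | case1 a h ih => omega
  | case2 a h => omega

theorem pyDecr_not_mem (l : List Int) (a : Int) : pyDecr l a ∉ l := by
  fun_induction pyDecr l a with
  | case1 a h ih => exact ih
  | case2 a h => exact h

theorem pyDecr_of_not_mem {l : List Int} {a : Int} (h : a ∉ l) : pyDecr l a = a := by
  rw [pyDecr]; simp [h]

theorem pyDecr_of_mem {l : List Int} {a : Int} (h : a ∈ l) : pyDecr l a = pyDecr l (a - 1) := by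
  rw [pyDecr]; simp [h]

-- effect on pyDecr of occupying the (previously free) slot b
theorem pyDecr_append {l : List Int} {b : Int} (hb : b ∉ l) (v : Int) :
    pyDecr (l ++ [b]) v = if pyDecr l v = b then pyDecr l (b - 1) else pyDecr l v := by
  fun_induction pyDecr (l ++ [b]) v with
  | case1 v h ih =>
    rcases List.mem_append.mp h with hv | hv
    · rw [pyDecr_of_mem hv] at *
      exact ih
    · simp at hv
      subst hv
      have h1 : pyDecr l (v - 1) ≠ v := by
        have := pyDecr_le l (v - 1); omega
      rw [ih, if_neg h1, pyDecr_of_not_mem hb, if_pos rfl]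
  | case2 v h =>
    simp [List.mem_append] at h
    rw [pyDecr_of_not_mem h.1]
    rw [if_neg h.2]

-- the invariant tying A's output-so-far list1 to B's pointer dict
def InvAB (l : List Int) (d : PySem.Dict Int Int) : Prop :=
  d.keys.Nodup ∧
  (∀ v : Int, v ∈ d.keys ↔ v ∈ l) ∧
  (∀ v w : Int, d.get? v = some w → w < v ∧ pyDecr l w = pyDecr l v)

theorem keys_length_eq_size (d : PySem.Dict Int Int) : d.keys.length = d.size := by
  simp [PySem.Dict.keys, PySem.Dict.size]

theorem findPath_correct {l : List Int} {d : PySem.Dict Int Int} (hinv : InvAB l d) :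
    ∀ (fuel : Nat) (a : Int), (d.keys.filter (fun x => decide (x ≤ a))).length < fuel →
      (findPath fuel d a).2 = pyDecr l a ∧
      ∀ p ∈ (findPath fuel d a).1, p ∈ d.keys ∧ pyDecr l p = pyDecr l a := by
  intro fuel
  induction fuel with
  | zero => intro a h; omega
  | succ n ih =>
    intro a hfuel
    match hg : d.get? a with
    | none =>
      have hna : a ∉ d.keys := (PySem.Dict.get?_eq_none_iff_not_mem_keys d a).mp hg
      have : a ∉ l := fun hc => hna ((hinv.2.1 a).mpr hc)
      simp [findPath, hg, pyDecr_of_not_mem this]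
    | some v =>
      have hmem : a ∈ d.keys :=
        PySem.Dict.mem_keys_of_mem_items d (PySem.Dict.mem_items_of_get?_eq_some d hg)
      have hva := hinv.2.2 a v hg
      have hmeas : (d.keys.filter (fun x => decide (x ≤ v))).length <
          (d.keys.filter (fun x => decide (x ≤ a))).length :=
        pyDecr_measure hva.1 hmem
      have ihv := ih v (by omega)
      refine ⟨?_, ?_⟩
      · simp only [findPath, hg]
        rw [ihv.1, hva.2]
      · intro p hp
        simp only [findPath, hg] at hp
        rcases List.mem_cons.mp hp with h | h
        · subst h; exact ⟨hmem, rfl⟩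
        · obtain ⟨h1, h2⟩ := ihv.2 p h
          exact ⟨h1, by rw [h2, hva.2]⟩

-- lookups after B's compression loop (all inserted values are the constant b-1)
theorem get?_foldl_insert_const (c : Int) :
    ∀ (ps : List Int) (d : PySem.Dict Int Int) (v : Int),
      (ps.foldl (fun d p => d.insert p c) d).get? v =
        if v ∈ ps then some c else d.get? v := by
  intro ps
  induction ps with
  | nil => intro d v; simp
  | cons p ps ih =>
    intro d v
    simp only [List.foldl_cons, ih, List.mem_cons]
    by_cases hv : v ∈ ps
    · simp [hv]
    · by_cases hvp : v = p
      · subst hvp; simp [hv, PySem.Dict.get?_insert_self]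
      · simp [hv, hvp, PySem.Dict.get?_insert_of_ne d _ hvp]

-- one step of both loops preserves the invariant
theorem step_inv {l : List Int} {d : PySem.Dict Int Int} (hinv : InvAB l d) (a : Int) :
    InvAB (l ++ [pyDecr l a])
      ((findPath (d.size + 1) d a).1.foldl (fun d p => d.insert p (pyDecr l a - 1))
        (d.insert (pyDecr l a) (pyDecr l a - 1))) := by
  set b := pyDecr l a with hbdef
  have hfuel : (d.keys.filter (fun x => decide (x ≤ a))).length < d.size + 1 := by
    have := List.length_filter_le (fun x => decide (x ≤ a)) d.keys
    have := keys_length_eq_size d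
    omega
  obtain ⟨hfp2, hfp1⟩ := findPath_correct hinv (d.size + 1) a hfuel
  set path := (findPath (d.size + 1) d a).1 with hpath
  have hbfree : b ∉ l := pyDecr_not_mem l a
  -- lookups in the new dict
  have hget : ∀ v : Int,
      (path.foldl (fun d p => d.insert p (b - 1)) (d.insert b (b - 1))).get? v =
        if v ∈ path ∨ v = b then some (b - 1) else d.get? v := by
    intro v
    rw [get?_foldl_insert_const]
    by_cases h1 : v ∈ path
    · simp [h1]
    · by_cases h2 : v = b
      · subst h2; simp [h1, PySem.Dict.get?_insert_self]
      · simp [h1, h2, PySem.Dict.get?_insert_of_ne d _ h2]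
  set d' := path.foldl (fun d p => d.insert p (b - 1)) (d.insert b (b - 1)) with hd'
  have hndk : d'.keys.Nodup := by
    apply PySem.Dict.nodup_keys_foldl_insert
    exact PySem.Dict.nodup_keys_insert _ _ _ hinv.1
  have hkeys : ∀ v : Int, v ∈ d'.keys ↔ v ∈ l ++ [b] := by
    intro v
    by_cases h1 : v ∈ path
    · rcases hfp1 v h1 with ⟨hk, _⟩
      have hvl : v ∈ l := (hinv.2.1 v).mp hk
      have hvd : v ∈ d'.keys := by
        by_contra hc
        have hn := (PySem.Dict.get?_eq_none_iff_not_mem_keys d' v).mpr hc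
        rw [hget v, if_pos (Or.inl h1)] at hn
        simp at hn
      simp [hvd, List.mem_append, hvl]
    · by_cases h2 : v = b
      · have hvd : v ∈ d'.keys := by
          by_contra hc
          have hn := (PySem.Dict.get?_eq_none_iff_not_mem_keys d' v).mpr hc
          rw [hget v, if_pos (Or.inr h2)] at hn
          simp at hn
        rw [h2] at hvd ⊢
        simp [hvd]
      · rw [← not_iff_not, ← PySem.Dict.get?_eq_none_iff_not_mem_keys, hget v,
          if_neg (by tauto), PySem.Dict.get?_eq_none_iff_not_mem_keys, hinv.2.1 v]
        simp [List.mem_append, h2]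
  refine ⟨hndk, hkeys, ?_⟩
  intro v w hvw
  rw [hget v] at hvw
  by_cases hc : v ∈ path ∨ v = b
  · rw [if_pos hc] at hvw
    have hw : w = b - 1 := by injection hvw; omega
    subst hw
    rcases hc with hvp | hvb
    · obtain ⟨hk, hdec⟩ := hfp1 v hvp
      have hvl : v ∈ l := (hinv.2.1 v).mp hk
      have hble : b ≤ v := by
        have := pyDecr_le l v; rw [hdec] at this; omega
      have hbne : b ≠ v := fun h => hbfree (h ▸ hvl)
      constructor
      · omega
      · rw [pyDecr_append hbfree, pyDecr_append hbfree]
        have h1 : pyDecr l (b - 1) ≠ b := by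
          have := pyDecr_le l (b - 1); omega
        rw [if_neg h1, if_pos (hdec.trans rfl)]
    · subst hvb
      refine ⟨by omega, ?_⟩
      have hbmem : b ∈ l ++ [b] := by simp
      rw [pyDecr_of_mem hbmem]
  · rw [if_neg hc] at hvw
    obtain ⟨hwlt, hdec⟩ := hinv.2.2 v w hvw
    refine ⟨hwlt, ?_⟩
    rw [pyDecr_append hbfree, pyDecr_append hbfree, hdec]

-- main loop correspondence
theorem loop_eq : ∀ (list2 : List Int) (num1 num2 : Int) (l out : List Int)
    (d : PySem.Dict Int Int), InvAB l d → out = l →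
    list2.foldl (fun list1 i =>
      let a := i + num1
      let a := if a > num2 then num2 else a
      list1 ++ [pyDecr list1 a]) l =
    (list2.foldl (fun (st : PySem.Dict Int Int × List Int) x =>
      let a := x + num1
      let a := if a > num2 then num2 else a
      let pr := findPath (st.1.size + 1) st.1 a
      let b := pr.2
      let d := st.1.insert b (b - 1)
      let d := pr.1.foldl (fun d p => d.insert p (b - 1)) d
      (d, st.2 ++ [b])) (d, out)).2 := by
  intro list2
  induction list2 with
  | nil => intro num1 num2 l out d hinv hout; simpa using hout.symm
  | cons x xs ih =>
    intro num1 num2 l out d hinv hout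
    subst hout
    simp only [List.foldl_cons]
    set a := if x + num1 > num2 then num2 else x + num1 with ha
    have hfuel : (d.keys.filter (fun y => decide (y ≤ a))).length < d.size + 1 := by
      have := List.length_filter_le (fun y => decide (y ≤ a)) d.keys
      have := keys_length_eq_size d
      omega
    have hfp2 := (findPath_correct hinv (d.size + 1) a hfuel).1
    exact ih num1 num2 _ _ _ (by simpa [hfp2] using step_inv hinv a) (by rw [hfp2])

theorem inv_empty : InvAB [] PySem.Dict.empty := by
  refine ⟨by simp [PySem.Dict.keys, PySem.Dict.empty], by simp [PySem.Dict.keys, PySem.Dict.empty], ?_⟩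
  intro v w h
  simp [PySem.Dict.get?_empty] at h

-- ===== VERDICT (by name: the statement is the Claim_ definition above) =====
theorem reconstructure_spec : Claim_equal_reconstructure := by
  intro num1 num2 list2 _
  unfold Spec_reconstructure reconstructure reconstructure_alt
  exact loop_eq list2 num1 num2 [] [] PySem.Dict.empty inv_empty rfl
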